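-- pv_equiv track=rewrite | github.com/MoiMohamed/en-ar-word-alignments | results/test_scripts/compute_aer_per_sentence.py | parse_alignment_pairs
-- ===== SOURCE A (Python) =====
-- from typing import Dict, List, Tuple
--
-- Pair = Tuple[str, str]
--
-- def parse_alignment_pairs(alignment: str) -> List[Pair]:
--     """Parse alignment string into list of (ar, en) pairs.
--
--     Robust to commas inside bracketed lists like [مدخنا, لست] or [a, nonsmoker].
--     """
--     pairs: List[Pair] = []
--     i = 0
--     n = len(alignment)
--     while i < n:
--         if alignment[i] != "(":
--             i += 1
--             continue
--
--         # find matching ')'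
--         j = alignment.find(")", i + 1)
--         if j == -1:
--             raise ValueError(f"Unmatched '(' in alignment segment: {alignment[i:]}")
--
--         content = alignment[i + 1 : j]
--
--         # split on first comma at bracket depth 0
--         bracket_depth = 0
--         split_idx = None
--         for k, ch in enumerate(content):
--             if ch == "[":
--                 bracket_depth += 1
--             elif ch == "]":
--                 bracket_depth -= 1
--             elif ch == "," and bracket_depth == 0:
--                 split_idx = k
--                 break
--
--         if split_idx is None:
--             raise ValueError(f"Could not find top-level comma in pair: ({content})")
--
--         ar = content[:split_idx].strip()
--         en = content[split_idx + 1 :].strip()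
--         pairs.append((ar, en))
--
--         i = j + 1
--
--     return pairs
-- ===== SOURCE B (Python) =====
-- from typing import List, Tuple
--
-- Pair = Tuple[str, str]
--
-- def parse_alignment_pairs(alignment: str) -> List[Pair]:
--     """Single-pass character state machine: no find()/slicing, one left-to-right scan."""
--     pairs: List[Pair] = []
--     in_paren = False
--     start = 0
--     depth = 0
--     comma_seen = False
--     ar_chars: List[str] = []
--     en_chars: List[str] = []
--     for idx, ch in enumerate(alignment):
--         if not in_paren:
--             if ch == "(":
--                 in_paren = True
--                 start = idx
--                 depth = 0
--                 comma_seen = False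
--                 ar_chars = []
--                 en_chars = []
--         else:
--             if ch == ")":
--                 if not comma_seen:
--                     raise ValueError(
--                         f"Could not find top-level comma in pair: ({''.join(ar_chars)})"
--                     )
--                 pairs.append(("".join(ar_chars).strip(), "".join(en_chars).strip()))
--                 in_paren = False
--             else:
--                 if ch == "[":
--                     depth += 1
--                 elif ch == "]":
--                     depth -= 1
--                 if ch == "," and depth == 0 and not comma_seen:
--                     comma_seen = True
--                 elif comma_seen:
--                     en_chars.append(ch)
--                 else:
--                     ar_chars.append(ch)
--     if in_paren:
--         raise ValueError(f"Unmatched '(' in alignment segment: {alignment[start:]}")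
--     return pairs
-- ===== Notes on version B (the rewrite author's own statement) =====
-- stated objective: alternative
-- what changed: A repeatedly searches forward for the next closing paren, slices out the content and rescans that slice to locate the depth-0 comma; B is a single left-to-right character state machine (in_paren/comma_seen flags, bracket depth, ar/en accumulators) that never slices or rescans.
import Mathlib
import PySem

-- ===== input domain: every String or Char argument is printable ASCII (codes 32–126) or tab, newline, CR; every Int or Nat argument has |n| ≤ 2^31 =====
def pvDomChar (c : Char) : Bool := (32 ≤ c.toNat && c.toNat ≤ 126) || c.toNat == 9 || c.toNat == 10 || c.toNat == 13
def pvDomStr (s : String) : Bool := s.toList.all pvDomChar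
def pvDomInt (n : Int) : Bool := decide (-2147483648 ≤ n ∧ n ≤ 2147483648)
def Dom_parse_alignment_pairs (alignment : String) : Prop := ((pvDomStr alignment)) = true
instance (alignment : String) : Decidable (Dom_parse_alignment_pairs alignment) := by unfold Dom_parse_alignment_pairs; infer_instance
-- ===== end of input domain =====

-- B replaces A's find-closing-paren-then-rescan-the-slice parsing by a single-pass character
-- state machine (alternative decomposition, same asymptotic cost).

-- ===== PORT A =====
-- alignment.find(")", i+1) together with the slices content = alignment[i+1:j] and the
-- advance i = j+1: split the suffix at its first closing paren
def findParen? : List Char → Option (List Char × List Char)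
  | [] => none
  | c :: rest =>
    if c = ')' then some ([], rest)
    else (findParen? rest).map (fun p => (c :: p.1, p.2))

-- (termination measure for loopA / wfA below)
theorem findParen?_length : ∀ {cs content after : List Char},
    findParen? cs = some (content, after) → after.length < cs.length := by
  intro cs
  induction cs with
  | nil => intro _ _ h; simp [findParen?] at h
  | cons c rest ih =>
    intro content after h
    simp only [findParen?] at h
    split at h
    · cases h
      simp
    · cases hfp : findParen? rest with
      | none => rw [hfp] at h; cases h
      | some p =>
        cases p with
        | mk p1 p2 =>
          rw [hfp] at h
          simp only [Option.map_some, Option.some.injEq, Prod.mk.injEq] at h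
          obtain ⟨-, h2⟩ := h
          have := ih hfp
          rw [← h2]
          simp only [List.length_cons]
          omega

-- the for-loop over content: index of the first comma at bracket depth 0
def findSplit : List Char → Int → Option Nat
  | [], _ => none
  | c :: rest, d =>
    if c = '[' then (findSplit rest (d + 1)).map (· + 1)
    else if c = ']' then (findSplit rest (d - 1)).map (· + 1)
    else if c = ',' ∧ d = 0 then some 0
    else (findSplit rest d).map (· + 1)

def stripS (cs : List Char) : String := String.ofList (PySem.Chars.strip cs)

-- the while-loop of A (none = ValueError)
def loopA : List Char → List (String × String) → Option (List (String × String))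
  | [], acc => some acc
  | c :: rest, acc =>
    if c ≠ '(' then loopA rest acc
    else
      match h : findParen? rest with
      | none => none
      | some (content, after) =>
        match findSplit content 0 with
        | none => none
        | some k =>
          loopA after (acc ++ [(stripS (content.take k), stripS (content.drop (k + 1)))])
termination_by cs => cs.length
decreasing_by
  · simp only [List.length_cons]; omega
  · have := findParen?_length h; simp only [List.length_cons]; omega

def parse_alignment_pairs (alignment : String) : List (String × String) :=
  (loopA alignment.toList []).getD []

-- ===== PORT B =====
-- the state machine of Source B: in_paren and comma_seen as match alternatives,
-- bracket depth d, ar/en accumulators (none = ValueError)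
def loopB : List Char → Bool → Int → Bool → List Char → List Char →
    List (String × String) → Option (List (String × String))
  | [], inp, _, _, _, _, acc => if inp then none else some acc
  | c :: rest, false, d, cm, ar, en, acc =>
    if c = '(' then loopB rest true 0 false [] [] acc
    else loopB rest false d cm ar en acc
  | c :: rest, true, d, false, ar, en, acc =>
    if c = ')' then none
    else
      let d' := if c = '[' then d + 1 else if c = ']' then d - 1 else d
      if c = ',' ∧ d' = 0 then loopB rest true d' true ar en acc
      else loopB rest true d' false (ar ++ [c]) en acc
  | c :: rest, true, d, true, ar, en, acc =>
    if c = ')' then loopB rest false d true ar en (acc ++ [(stripS ar, stripS en)])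
    else
      let d' := if c = '[' then d + 1 else if c = ']' then d - 1 else d
      loopB rest true d' true ar (en ++ [c]) acc

def parse_alignment_pairs_alt (alignment : String) : List (String × String) :=
  (loopB alignment.toList false 0 false [] [] []).getD []

-- ===== PRECONDITION & SPEC =====
-- Pre_ excludes exactly the inputs on which Python A raises ValueError (an unmatched
-- opening paren, or a pair whose content has no comma at bracket depth 0); Python B
-- raises the same ValueError on the same inputs.
-- closed-form: a comma at bracket depth 0 exists in cs (counts of open and close brackets before it agree)
def HasTopComma (cs : List Char) : Prop :=
  ∃ k < cs.length, cs[k]? = some ',' ∧ (cs.take k).count '[' = (cs.take k).count ']'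
def Pre_parse_alignment_pairs (alignment : String) : Prop :=
  (∀ part ∈ (alignment.toList.splitOn ')').dropLast,
      '(' ∈ part → HasTopComma ((part.dropWhile (· ≠ '(')).tail)) ∧
  '(' ∉ (alignment.toList.splitOn ')').getLastD []
instance (alignment : String) : Decidable (Pre_parse_alignment_pairs alignment) := by
  unfold Pre_parse_alignment_pairs HasTopComma; infer_instance

def pvWitness_parse_alignment_pairs : String := "(a, b) ([x, y], z)"

def Spec_parse_alignment_pairs (alignment : String) (out : List (String × String)) : Prop := out = parse_alignment_pairs_alt alignment
instance (alignment : String) (out : List (String × String)) : Decidable (Spec_parse_alignment_pairs alignment out) := by unfold Spec_parse_alignment_pairs; infer_instance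

-- ===== CLAIM (what is proved, stated in full; the proofs are below) =====
def Claim_equal_parse_alignment_pairs : Prop := ∀ (alignment : String), Dom_parse_alignment_pairs alignment → Pre_parse_alignment_pairs alignment → Spec_parse_alignment_pairs alignment (parse_alignment_pairs alignment)

-- ===== LEMMAS AND PROOFS =====

-- outside a segment the carried segment state of loopB is dead
theorem loopB_out_irrel : ∀ (cs : List Char) (d : Int) (cm : Bool) (ar en : List Char)
    (d' : Int) (cm' : Bool) (ar' en' : List Char) (acc : List (String × String)),
    loopB cs false d cm ar en acc = loopB cs false d' cm' ar' en' acc := by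
  intro cs
  induction cs with
  | nil => intros; simp [loopB]
  | cons c rest ih =>
    intro d cm ar en d' cm' ar' en' acc
    by_cases hc : c = '('
    · simp [loopB, hc]
    · simp only [loopB, if_neg hc]
      exact ih _ _ _ _ _ _ _ _ _

-- the comma-seen phase of a segment collects exactly the content up to the first closing paren
theorem loopB_comma : ∀ (cs : List Char) (d : Int) (ar en : List Char)
    (acc : List (String × String)),
    loopB cs true d true ar en acc =
      match findParen? cs with
      | none => none
      | some (content, after) =>
        loopB after false 0 false [] [] (acc ++ [(stripS ar, stripS (en ++ content))]) := by
  intro cs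
  induction cs with
  | nil => intros; simp [loopB, findParen?]
  | cons c rest ih =>
    intro d ar en acc
    by_cases hc : c = ')'
    · simp only [loopB, findParen?, if_pos hc, List.append_nil]
      exact loopB_out_irrel _ _ _ _ _ _ _ _ _ _
    · simp only [loopB, findParen?, if_neg hc]
      rw [ih]
      cases hfp : findParen? rest with
      | none => simp
      | some p =>
        cases p with
        | mk content after => simp [List.append_assoc]

-- the comma-not-yet-seen phase: B's split point is A's findSplit index
theorem loopB_noComma : ∀ (cs : List Char) (d : Int) (ar : List Char)
    (acc : List (String × String)),
    loopB cs true d false ar [] acc =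
      match findParen? cs with
      | none => none
      | some (content, after) =>
        match findSplit content d with
        | none => none
        | some k =>
          loopB after false 0 false [] []
            (acc ++ [(stripS (ar ++ content.take k), stripS (content.drop (k + 1)))]) := by
  intro cs
  induction cs with
  | nil => intros; simp [loopB, findParen?]
  | cons c rest ih =>
    intro d ar acc
    by_cases hc : c = ')'
    · simp [loopB, hc, findParen?, findSplit]
    · simp only [loopB, findParen?, if_neg hc]
      set d' : Int := if c = '[' then d + 1 else if c = ']' then d - 1 else d with hd'
      by_cases hcomma : c = ',' ∧ d' = 0
      · rw [if_pos hcomma, loopB_comma]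
        obtain ⟨hc1, hc2⟩ := hcomma
        have hdd : d' = d := by rw [hd', hc1, if_neg (by decide), if_neg (by decide)]
        cases hfp : findParen? rest with
        | none => simp
        | some p =>
          cases p with
          | mk content after =>
            have hd0 : d = 0 := by rw [← hdd]; exact hc2
            have hs : findSplit (c :: content) d = some 0 := by
              subst hc1 hd0
              simp [findSplit]
            simp [hs]
      · rw [if_neg hcomma, ih]
        cases hfp : findParen? rest with
        | none => simp
        | some p =>
          cases p with
          | mk content after =>
            have hs : findSplit (c :: content) d = (findSplit content d').map (· + 1) := by
              by_cases hb1 : c = '['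
              · simp only [findSplit]
                rw [if_pos hb1, hd', if_pos hb1]
              · by_cases hb2 : c = ']'
                · simp only [findSplit]
                  rw [if_neg hb1, if_pos hb2, hd', if_neg hb1, if_pos hb2]
                · have hdd : d' = d := by rw [hd', if_neg hb1, if_neg hb2]
                  have hno : ¬ (c = ',' ∧ d = 0) := by
                    intro hh; exact hcomma ⟨hh.1, by omega⟩
                  simp only [findSplit]
                  rw [if_neg hb1, if_neg hb2, if_neg hno, hdd]
            cases hk : findSplit content d' with
            | none => simp [hs, hk]
            | some k =>
              simp [hs, hk, List.take_succ_cons, List.drop_succ_cons, List.append_assoc]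

theorem loopA_eq_loopB : ∀ (n : Nat) (cs : List Char), cs.length ≤ n →
    ∀ acc, loopA cs acc = loopB cs false 0 false [] [] acc := by
  intro n
  induction n with
  | zero =>
    intro cs hlen acc
    have : cs = [] := List.length_eq_zero_iff.mp (Nat.le_zero.mp hlen)
    simp [this, loopA, loopB]
  | succ n ih =>
    intro cs hlen acc
    cases cs with
    | nil => simp [loopA, loopB]
    | cons c rest =>
      by_cases hc : c = '('
      · simp only [loopA, loopB, if_pos hc, if_neg (by simp [hc] : ¬ c ≠ '(')]
        rw [loopB_noComma]
        cases hfp : findParen? rest with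
        | none => simp
        | some p =>
          cases p with
          | mk content after =>
            cases hk : findSplit content 0 with
            | none => simp [hk]
            | some k =>
              have hlt := findParen?_length hfp
              have hle : after.length ≤ n := by
                simp only [List.length_cons] at hlen; omega
              simp only [hk]
              rw [ih after hle]
              simp
      · simp only [loopA, loopB, if_neg hc, if_pos (by simp [hc] : c ≠ '(')]
        exact ih rest (by simp only [List.length_cons] at hlen; omega) acc

-- ===== VERDICT (by name: the statement is the Claim_ definition above) =====
theorem parse_alignment_pairs_spec : Claim_equal_parse_alignment_pairs := by
  intro alignment _ _
  unfold Spec_parse_alignment_pairs parse_alignment_pairs parse_alignment_pairs_alt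
  rw [loopA_eq_loopB alignment.toList.length alignment.toList le_rfl]
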